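-- pv_equiv track=rewrite | github.com/raymondcatney-byte/openclaw-workspace | cyber-globe/bridge/deerflow_bridge.py | _map_threat_type
-- ===== SOURCE A (Python) =====
-- def _map_threat_type(threat_type: str) -> str:
--     """Map various threat descriptions to standard event types"""
--     threat_lower = threat_type.lower()
--
--     if any(word in threat_lower for word in ['attack', 'ddos', 'ransomware', 'malware']):
--         return 'attack'
--     elif any(word in threat_lower for word in ['breach', 'leak', 'exposed']):
--         return 'breach'
--     elif any(word in threat_lower for word in ['transfer', 'transaction', 'wallet']):
--         return 'transfer'
--     elif any(word in threat_lower for word in ['alert', 'warning', 'critical']):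
--         return 'alert'
--     else:
--         return 'activity'
-- ===== SOURCE B (Python) =====
-- # Exhaustive scan with a running-minimum priority over a flat keyword->rank map,
-- # instead of a first-match if/elif cascade; the category table is indexed at the end.
-- _KEYWORD_RANK = {
--     'attack': 0, 'ddos': 0, 'ransomware': 0, 'malware': 0,
--     'breach': 1, 'leak': 1, 'exposed': 1,
--     'transfer': 2, 'transaction': 2, 'wallet': 2,
--     'alert': 3, 'warning': 3, 'critical': 3,
-- }
-- _CATEGORIES = ['attack', 'breach', 'transfer', 'alert', 'activity']
--
--
-- def _map_threat_type(threat_type: str) -> str: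
--     """Map various threat descriptions to standard event types."""
--     threat_lower = threat_type.lower()
--     best = 4  # rank of the fallback category 'activity'
--     for word, rank in _KEYWORD_RANK.items():
--         if rank < best and word in threat_lower:
--             best = rank
--     return _CATEGORIES[best]
-- ===== Notes on version B (the rewrite author's own statement) =====
-- stated objective: alternative
-- what changed: Replaced the first-match if/elif cascade over keyword groups with an exhaustive scan of a flat keyword->priority map keeping a running-minimum rank, then indexing a category table with that rank.
import Mathlib
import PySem

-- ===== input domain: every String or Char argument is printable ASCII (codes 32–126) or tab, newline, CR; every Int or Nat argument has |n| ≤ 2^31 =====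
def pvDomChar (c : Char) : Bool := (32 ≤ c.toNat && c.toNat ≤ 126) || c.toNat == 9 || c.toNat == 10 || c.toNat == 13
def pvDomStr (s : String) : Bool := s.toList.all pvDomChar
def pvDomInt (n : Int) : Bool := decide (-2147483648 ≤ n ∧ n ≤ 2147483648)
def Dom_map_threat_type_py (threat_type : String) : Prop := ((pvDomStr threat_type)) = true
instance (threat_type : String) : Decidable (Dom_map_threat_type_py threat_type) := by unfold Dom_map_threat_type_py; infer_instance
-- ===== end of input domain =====

-- B replaces A's first-match if/elif cascade by a running-minimum scan of a flat
-- keyword->priority map followed by a table lookup (alternative decomposition, same cost).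

-- ===== PORT A =====
-- Literal port of A's if/elif cascade; 'word in threat_lower' = PySem.Str.isIn.
def map_threat_type_py (threat_type : String) : String :=
  let threat_lower := PySem.Str.lower threat_type
  if (["attack", "ddos", "ransomware", "malware"].any (fun w => PySem.Str.isIn w threat_lower)) = true then
    "attack"
  else if (["breach", "leak", "exposed"].any (fun w => PySem.Str.isIn w threat_lower)) = true then
    "breach"
  else if (["transfer", "transaction", "wallet"].any (fun w => PySem.Str.isIn w threat_lower)) = true then
    "transfer"
  else if (["alert", "warning", "critical"].any (fun w => PySem.Str.isIn w threat_lower)) = true then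
    "alert"
  else
    "activity"

-- ===== PORT B =====
-- Source B's _KEYWORD_RANK dict as an association list in insertion order.
def mttKeywordRank : List (String × Nat) :=
  [("attack", 0), ("ddos", 0), ("ransomware", 0), ("malware", 0),
   ("breach", 1), ("leak", 1), ("exposed", 1),
   ("transfer", 2), ("transaction", 2), ("wallet", 2),
   ("alert", 3), ("warning", 3), ("critical", 3)]

def mttCategories : List String :=
  ["attack", "breach", "transfer", "alert", "activity"]

-- Source B's for-loop: running minimum rank over the keyword map.
def mttLoop (threat_lower : String) : List (String × Nat) → Nat → Nat
  | [], best => best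
  | (word, rank) :: rest, best =>
      mttLoop threat_lower rest
        (if rank < best ∧ PySem.Str.isIn word threat_lower = true then rank else best)

def map_threat_type_py_alt (threat_type : String) : String :=
  let threat_lower := PySem.Str.lower threat_type
  -- _CATEGORIES[best]: best is always ≤ 4, so the list index is in range; getD's
  -- default is never reached.
  mttCategories.getD (mttLoop threat_lower mttKeywordRank 4) ""

-- ===== PRECONDITION & SPEC =====
def Spec_map_threat_type_py (threat_type : String) (out : String) : Prop := out = map_threat_type_py_alt threat_type
instance (threat_type : String) (out : String) : Decidable (Spec_map_threat_type_py threat_type out) := by unfold Spec_map_threat_type_py; infer_instance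

-- ===== CLAIM (what is proved, stated in full; the proofs are below) =====
def Claim_equal_map_threat_type_py : Prop := ∀ (threat_type : String), Dom_map_threat_type_py threat_type → Spec_map_threat_type_py threat_type (map_threat_type_py threat_type)

-- ===== LEMMAS AND PROOFS =====

-- Both ports depend on the input only through the 13 Booleans 'isIn w threat_lower',
-- one per keyword, in dict order. These two helpers are the ports with those
-- Booleans abstracted out; applying them to the actual 'isIn' tests is definitional.
def mttAbsA (b1 b2 b3 b4 b5 b6 b7 b8 b9 b10 b11 b12 b13 : Bool) : String :=
  if ([b1, b2, b3, b4].any id) = true then "attack"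
  else if ([b5, b6, b7].any id) = true then "breach"
  else if ([b8, b9, b10].any id) = true then "transfer"
  else if ([b11, b12, b13].any id) = true then "alert"
  else "activity"

def mttLoopAbs : List (Nat × Bool) → Nat → Nat
  | [], best => best
  | (rank, b) :: rest, best =>
      mttLoopAbs rest (if rank < best ∧ b = true then rank else best)

def mttAbsB (b1 b2 b3 b4 b5 b6 b7 b8 b9 b10 b11 b12 b13 : Bool) : String :=
  mttCategories.getD
    (mttLoopAbs
      [(0, b1), (0, b2), (0, b3), (0, b4), (1, b5), (1, b6), (1, b7),
       (2, b8), (2, b9), (2, b10), (3, b11), (3, b12), (3, b13)] 4) ""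

set_option maxHeartbeats 4000000 in
theorem mttAbs_eq : ∀ b1 b2 b3 b4 b5 b6 b7 b8 b9 b10 b11 b12 b13 : Bool,
    mttAbsA b1 b2 b3 b4 b5 b6 b7 b8 b9 b10 b11 b12 b13
      = mttAbsB b1 b2 b3 b4 b5 b6 b7 b8 b9 b10 b11 b12 b13 := by decide

-- mttLoop is mttLoopAbs with each keyword replaced by its 'isIn' test.
theorem mttLoop_eq_abs (tl : String) (ps : List (String × Nat)) (best : Nat) :
    mttLoop tl ps best
      = mttLoopAbs (ps.map fun p => (p.2, PySem.Str.isIn p.1 tl)) best := by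
  induction ps generalizing best with
  | nil => rfl
  | cons p rest ih => simp only [mttLoop, mttLoopAbs, List.map_cons, ih]

-- ===== VERDICT (by name: the statement is the Claim_ definition above) =====
set_option maxHeartbeats 4000000 in
theorem map_threat_type_py_spec : Claim_equal_map_threat_type_py := by
  intro t _
  show map_threat_type_py t = map_threat_type_py_alt t
  simp only [map_threat_type_py_alt, mttLoop_eq_abs, mttKeywordRank, List.map_cons,
    List.map_nil]
  exact mttAbs_eq
    (PySem.Str.isIn "attack" (PySem.Str.lower t)) (PySem.Str.isIn "ddos" (PySem.Str.lower t))
    (PySem.Str.isIn "ransomware" (PySem.Str.lower t)) (PySem.Str.isIn "malware" (PySem.Str.lower t))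
    (PySem.Str.isIn "breach" (PySem.Str.lower t)) (PySem.Str.isIn "leak" (PySem.Str.lower t))
    (PySem.Str.isIn "exposed" (PySem.Str.lower t)) (PySem.Str.isIn "transfer" (PySem.Str.lower t))
    (PySem.Str.isIn "transaction" (PySem.Str.lower t)) (PySem.Str.isIn "wallet" (PySem.Str.lower t))
    (PySem.Str.isIn "alert" (PySem.Str.lower t)) (PySem.Str.isIn "warning" (PySem.Str.lower t))
    (PySem.Str.isIn "critical" (PySem.Str.lower t))
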